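-- pv_equiv track=rewrite | github.com/jonathonreilly/toy-physics | scripts/frontier_su3_4d_mc_L8_2026_05_04.py | build_4d_lattice
-- ===== SOURCE A (Python) =====
-- def build_4d_lattice(Ls, Lt):
--     Ls_dims = [Ls, Ls, Ls, Lt]
--     n_sites = Ls * Ls * Ls * Lt
--     def site(x, y, z, t): return x + Ls*y + Ls*Ls*z + Ls*Ls*Ls*t
--     def coords_for(s):
--         t = s // (Ls**3); s2 = s - t*Ls**3
--         z = s2 // (Ls**2); s3 = s2 - z*Ls**2
--         y = s3 // Ls; x = s3 - y*Ls
--         return [x, y, z, t]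
--     links = []
--     link_idx = {}
--     for s in range(n_sites):
--         coords = coords_for(s)
--         for d in range(4):
--             new_coords = coords.copy()
--             new_coords[d] = (new_coords[d] + 1) % Ls_dims[d]
--             link_idx[(s, d)] = len(links)
--             links.append(s)
--     plaquettes = []
--     for s in range(n_sites):
--         coords = coords_for(s)
--         for i in range(4):
--             for j in range(i+1, 4):
--                 l1 = link_idx[(s, i)]
--                 s1_coords = coords.copy(); s1_coords[i] = (s1_coords[i]+1) % Ls_dims[i]
--                 s1 = site(*s1_coords)
--                 l2 = link_idx[(s1, j)]
--                 s3_coords = coords.copy(); s3_coords[j] = (s3_coords[j]+1) % Ls_dims[j]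
--                 s3 = site(*s3_coords)
--                 l3 = link_idx[(s3, i)]
--                 l4 = link_idx[(s, j)]
--                 plaquettes.append([(l1, +1), (l2, +1), (l3, -1), (l4, -1)])
--     return len(links), plaquettes
-- ===== SOURCE B (Python) =====
-- def build_4d_lattice(Ls, Lt):
--     # Different construction: instead of decoding each site index s with div/mod
--     # and maintaining a links list + link_idx dict, enumerate the lattice by its
--     # coordinates with four nested loops (x fastest, matching A's site order),
--     # compose the site index s = x + Ls*y + Ls^2*z + Ls^3*t directly, and use
--     # that link (s, d) always has index 4*s + d.  No division, no dict, one pass.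
--     if Ls <= 0 or Lt <= 0:
--         return 0, []          # degenerate size: empty lattice
--     dims = (Ls, Ls, Ls, Lt)
--     plaquettes = []
--     n_sites = 0
--     for t in range(Lt):
--         for z in range(Ls):
--             for y in range(Ls):
--                 for x in range(Ls):
--                     n_sites += 1
--                     c = (x, y, z, t)
--                     nbr = []
--                     for d in range(4):
--                         w = list(c)
--                         w[d] = (w[d] + 1) % dims[d]
--                         nbr.append(w[0] + Ls*w[1] + Ls*Ls*w[2] + Ls*Ls*Ls*w[3])
--                     s = x + Ls*y + Ls*Ls*z + Ls*Ls*Ls*t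
--                     for i in range(4):
--                         for j in range(i + 1, 4):
--                             plaquettes.append([(4*s + i, 1), (4*nbr[i] + j, 1),
--                                                (4*nbr[j] + i, -1), (4*s + j, -1)])
--     return 4 * n_sites, plaquettes
-- ===== Notes on version B (the rewrite author's own statement) =====
-- stated objective: alternative
-- what changed: B replaces A's two staged passes (a first loop building a links list and a link_idx dict, then a site loop that div/mod-decodes each site index and looks plaquette links up in the dict) by a single pass of four nested coordinate loops that compose the site index s = x + Ls*y + Ls^2*z + Ls^3*t directly and compute every link index as 4*s + d, so the links list, the dict and all index decoding disappear.
-- intended difference: On Ls = -1 and Lt <= -1 (a negative lattice size with accidentally positive n_sites = -Lt) A returns a nonempty fake lattice of 4*(-Lt) links and 6*(-Lt) plaquettes built from bogus coordinates, while B returns the empty lattice (0, []), the intended value for a degenerate size. — e.g. on build_4d_lattice(-1, -1): A returns (4, [[(0, 1), (1, 1), (0, -1), (1, -1)], [(0, 1), (2, 1), (0, -1), (2, -1)], [(0, 1), (3, 1), (0, -1), (3, -1)], [(1, 1…, B returns (0, [])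
import Mathlib
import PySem

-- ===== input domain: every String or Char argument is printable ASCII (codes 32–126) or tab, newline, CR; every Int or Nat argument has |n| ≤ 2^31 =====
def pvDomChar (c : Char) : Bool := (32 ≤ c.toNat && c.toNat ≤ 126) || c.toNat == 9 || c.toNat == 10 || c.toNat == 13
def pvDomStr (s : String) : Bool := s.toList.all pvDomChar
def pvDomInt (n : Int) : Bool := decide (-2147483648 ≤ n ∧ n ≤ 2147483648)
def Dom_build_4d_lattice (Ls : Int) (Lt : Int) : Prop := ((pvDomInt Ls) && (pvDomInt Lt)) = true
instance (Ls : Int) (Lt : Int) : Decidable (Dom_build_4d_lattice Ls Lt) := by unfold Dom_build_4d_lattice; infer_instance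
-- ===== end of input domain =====

-- B replaces A's two staged passes (index-decoding each site with div/mod, a links list
-- and a link_idx dict) by one pass of four nested coordinate loops that COMPOSE the site
-- index and compute every link index as 4*s+d; on negative lattice sizes (D_) B returns
-- the empty lattice instead of A's accidental output.

-- ===== PORT A =====
-- helper 'site(x, y, z, t)'
def a_site (Ls x y z t : Int) : Int := x + Ls*y + Ls*Ls*z + Ls*Ls*Ls*t

-- helper 'coords_for(s)'
def a_coords (Ls s : Int) : List Int :=
  let t := PySem.Int.floordiv s (Ls^3); let s2 := s - t*Ls^3
  let z := PySem.Int.floordiv s2 (Ls^2); let s3 := s2 - z*Ls^2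
  let y := PySem.Int.floordiv s3 Ls; let x := s3 - y*Ls
  [x, y, z, t]

-- 'new_coords = coords.copy(); new_coords[d] = (new_coords[d] + 1) % Ls_dims[d]'
-- (d is always one of 0,1,2,3 here, so .toNat indexing is Python-exact)
def a_wrap (dims coords : List Int) (d : Int) : List Int :=
  coords.set d.toNat (PySem.Int.mod (coords.getD d.toNat 0 + 1) (dims.getD d.toNat 0))

-- body of A's first loop (one site s: four links appended, dict entries added)
def a_link_site (Ls Lt : Int) (st : List Int × PySem.Dict (Int × Int) Int) (s : Int) :
    List Int × PySem.Dict (Int × Int) Int :=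
  let coords := a_coords Ls s
  (PySem.List.pyRange 0 4 1).foldl (fun st d =>
    let _new_coords := a_wrap [Ls, Ls, Ls, Lt] coords d   -- computed and unused, as in the Python
    (st.1 ++ [s], st.2.insert (s, d) ((st.1.length : Int)))) st

-- body of A's second loop (one site s: six plaquettes appended).
-- 'link_idx[(s, d)]' would raise KeyError on a missing key; Pre_ excludes exactly
-- those inputs, so the .getD default is never read.
def a_plaq_site (Ls Lt : Int) (link_idx : PySem.Dict (Int × Int) Int)
    (acc : List (List (Int × Int))) (s : Int) : List (List (Int × Int)) :=
  let coords := a_coords Ls s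
  (PySem.List.pyRange 0 4 1).foldl (fun acc i =>
    (PySem.List.pyRange (i+1) 4 1).foldl (fun acc j =>
      let l1 := (link_idx.get? (s, i)).getD 0
      let s1c := a_wrap [Ls, Ls, Ls, Lt] coords i
      let s1 := a_site Ls (s1c.getD 0 0) (s1c.getD 1 0) (s1c.getD 2 0) (s1c.getD 3 0)
      let l2 := (link_idx.get? (s1, j)).getD 0
      let s3c := a_wrap [Ls, Ls, Ls, Lt] coords j
      let s3 := a_site Ls (s3c.getD 0 0) (s3c.getD 1 0) (s3c.getD 2 0) (s3c.getD 3 0)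
      let l3 := (link_idx.get? (s3, i)).getD 0
      let l4 := (link_idx.get? (s, j)).getD 0
      acc ++ [[(l1, 1), (l2, 1), (l3, -1), (l4, -1)]]) acc) acc

def build_4d_lattice (Ls : Int) (Lt : Int) : Int × (List (List (Int × Int))) :=
  let n_sites := Ls * Ls * Ls * Lt
  let first := (PySem.List.pyRange 0 n_sites 1).foldl (a_link_site Ls Lt)
    (([] : List Int), (PySem.Dict.empty : PySem.Dict (Int × Int) Int))
  let plaquettes := (PySem.List.pyRange 0 n_sites 1).foldl (a_plaq_site Ls Lt first.2) []
  ((first.1.length : Int), plaquettes)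

-- ===== PORT B =====
-- 'nbr' list of Source B: for d in range(4): wrap coordinate d and re-encode the site
-- (indices d, 0..3 are always in range, so .toNat/getD indexing is Python-exact)
def b_nbrs (Ls Lt x y z t : Int) : List Int :=
  (PySem.List.pyRange 0 4 1).foldl (fun acc d =>
    let w := ([x, y, z, t] : List Int).set d.toNat
      (PySem.Int.mod (([x, y, z, t] : List Int).getD d.toNat 0 + 1)
        (([Ls, Ls, Ls, Lt] : List Int).getD d.toNat 0))
    acc ++ [w.getD 0 0 + Ls * w.getD 1 0 + Ls*Ls * w.getD 2 0 + Ls*Ls*Ls * w.getD 3 0]) []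

-- innermost body of Source B: one coordinate tuple (x, y, z, t)
def b_site_body (Ls Lt : Int) (st : Int × List (List (Int × Int))) (x y z t : Int) :
    Int × List (List (Int × Int)) :=
  let n := b_nbrs Ls Lt x y z t
  let s := x + Ls*y + Ls*Ls*z + Ls*Ls*Ls*t
  (st.1 + 1,
   (PySem.List.pyRange 0 4 1).foldl (fun acc i =>
     (PySem.List.pyRange (i+1) 4 1).foldl (fun acc j =>
       acc ++ [[(4*s + i, 1), (4 * n.getD i.toNat 0 + j, 1),
                (4 * n.getD j.toNat 0 + i, -1), (4*s + j, -1)]]) acc) st.2)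

def build_4d_lattice_alt (Ls : Int) (Lt : Int) : Int × (List (List (Int × Int))) :=
  if Ls ≤ 0 ∨ Lt ≤ 0 then (0, [])
  else
  let st := (PySem.List.pyRange 0 Lt 1).foldl (fun st t =>
    (PySem.List.pyRange 0 Ls 1).foldl (fun st z =>
      (PySem.List.pyRange 0 Ls 1).foldl (fun st y =>
        (PySem.List.pyRange 0 Ls 1).foldl (fun st x =>
          b_site_body Ls Lt st x y z t) st) st) st) ((0 : Int), ([] : List (List (Int × Int))))
  (4 * st.1, st.2)

-- ===== PRECONDITION & SPEC =====
-- Pre_ excludes exactly Ls ≤ -2 ∧ Lt ≤ -1, the only inputs on which A raises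
-- (n_sites > 0 but a wrapped neighbour site falls outside the dict: KeyError).
def Pre_build_4d_lattice (Ls : Int) (Lt : Int) : Prop := -1 ≤ Ls ∨ 0 ≤ Lt
instance (Ls : Int) (Lt : Int) : Decidable (Pre_build_4d_lattice Ls Lt) := by unfold Pre_build_4d_lattice; infer_instance
def pvWitness_build_4d_lattice : Int × Int := (2, 2)

-- On Ls = -1 ∧ Lt ≤ -1 (a negative lattice size, but n_sites = -Lt > 0) A returns a
-- nonempty fake lattice (4·(-Lt) links and 6·(-Lt) plaquettes built from bogus coords),
-- while B returns the empty lattice (0, []), the intended value for a degenerate size.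
def D_build_4d_lattice (Ls : Int) (Lt : Int) : Prop := Ls = -1 ∧ Lt ≤ -1
instance (Ls : Int) (Lt : Int) : Decidable (D_build_4d_lattice Ls Lt) := by unfold D_build_4d_lattice; infer_instance

def Spec_build_4d_lattice (Ls : Int) (Lt : Int) (out : Int × (List (List (Int × Int)))) : Prop :=
  ¬ D_build_4d_lattice Ls Lt → out = build_4d_lattice_alt Ls Lt
instance (Ls : Int) (Lt : Int) (out : Int × (List (List (Int × Int)))) : Decidable (Spec_build_4d_lattice Ls Lt out) := by unfold Spec_build_4d_lattice; infer_instance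

def pvDiffWitness_build_4d_lattice : Int × Int := (-1, -1)
def pvDiffWitnessOut_build_4d_lattice :
    (Int × (List (List (Int × Int)))) × (Int × (List (List (Int × Int)))) :=
  ((4, [[(0, 1), (1, 1), (0, -1), (1, -1)], [(0, 1), (2, 1), (0, -1), (2, -1)],
        [(0, 1), (3, 1), (0, -1), (3, -1)], [(1, 1), (2, 1), (1, -1), (2, -1)],
        [(1, 1), (3, 1), (1, -1), (3, -1)], [(2, 1), (3, 1), (2, -1), (3, -1)]]),
   (0, []))

-- ===== CLAIM (what is proved, stated in full; the proofs are below) =====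
def Claim_unchanged_build_4d_lattice : Prop := ∀ (Ls : Int) (Lt : Int), Dom_build_4d_lattice Ls Lt → Pre_build_4d_lattice Ls Lt → Spec_build_4d_lattice Ls Lt (build_4d_lattice Ls Lt)
def Claim_changed_build_4d_lattice : Prop := Dom_build_4d_lattice (pvDiffWitness_build_4d_lattice.1) (pvDiffWitness_build_4d_lattice.2) ∧ Pre_build_4d_lattice (pvDiffWitness_build_4d_lattice.1) (pvDiffWitness_build_4d_lattice.2) ∧ D_build_4d_lattice (pvDiffWitness_build_4d_lattice.1) (pvDiffWitness_build_4d_lattice.2) ∧ build_4d_lattice (pvDiffWitness_build_4d_lattice.1) (pvDiffWitness_build_4d_lattice.2) = pvDiffWitnessOut_build_4d_lattice.1 ∧ build_4d_lattice_alt (pvDiffWitness_build_4d_lattice.1) (pvDiffWitness_build_4d_lattice.2) = pvDiffWitnessOut_build_4d_lattice.2 ∧ pvDiffWitnessOut_build_4d_lattice.1 ≠ pvDiffWitnessOut_build_4d_lattice.2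
def Claim_exact_build_4d_lattice : Prop := ∀ (Ls : Int) (Lt : Int), Dom_build_4d_lattice Ls Lt → Pre_build_4d_lattice Ls Lt → D_build_4d_lattice Ls Lt → build_4d_lattice Ls Lt ≠ build_4d_lattice_alt Ls Lt

-- ===== LEMMAS AND PROOFS =====

-- neighbour site in direction d (proof-side abbreviation of what both loop bodies compute)
def a_nbr (Ls Lt s d : Int) : Int :=
  let w := a_wrap [Ls, Ls, Ls, Lt] (a_coords Ls s) d
  a_site Ls (w.getD 0 0) (w.getD 1 0) (w.getD 2 0) (w.getD 3 0)

-- the six plaquettes both programs emit at site s, written once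
def emit (Ls Lt s : Int) : List (List (Int × Int)) :=
  ([(0, 1), (0, 2), (0, 3), (1, 2), (1, 3), (2, 3)] : List (Int × Int)).map (fun p =>
    [(4*s + p.1, 1), (4 * a_nbr Ls Lt s p.1 + p.2, 1),
     (4 * a_nbr Ls Lt s p.2 + p.1, -1), (4*s + p.2, -1)])

-- ---------- A side ----------

lemma coords_eq (Ls s : Int) :
    a_coords Ls s =
      [PySem.Int.mod (PySem.Int.mod (PySem.Int.mod s (Ls*Ls*Ls)) (Ls*Ls)) Ls,
       PySem.Int.floordiv (PySem.Int.mod (PySem.Int.mod s (Ls*Ls*Ls)) (Ls*Ls)) Ls,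
       PySem.Int.floordiv (PySem.Int.mod s (Ls*Ls*Ls)) (Ls*Ls),
       PySem.Int.floordiv s (Ls*Ls*Ls)] := by
  have h3 : Ls^3 = Ls*Ls*Ls := by ring
  have h2 : Ls^2 = Ls*Ls := by ring
  have e1 := PySem.Int.floordiv_mul_add_mod s (Ls*Ls*Ls)
  simp only [a_coords, h3, h2]
  have hs2 : s - PySem.Int.floordiv s (Ls*Ls*Ls) * (Ls*Ls*Ls) = PySem.Int.mod s (Ls*Ls*Ls) := by
    linarith
  rw [hs2]
  have e2 := PySem.Int.floordiv_mul_add_mod (PySem.Int.mod s (Ls*Ls*Ls)) (Ls*Ls)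
  have hs3 : PySem.Int.mod s (Ls*Ls*Ls) - PySem.Int.floordiv (PySem.Int.mod s (Ls*Ls*Ls)) (Ls*Ls) * (Ls*Ls)
      = PySem.Int.mod (PySem.Int.mod s (Ls*Ls*Ls)) (Ls*Ls) := by linarith
  rw [hs3]
  have e3 := PySem.Int.floordiv_mul_add_mod (PySem.Int.mod (PySem.Int.mod s (Ls*Ls*Ls)) (Ls*Ls)) Ls
  have hx : PySem.Int.mod (PySem.Int.mod s (Ls*Ls*Ls)) (Ls*Ls) - PySem.Int.floordiv (PySem.Int.mod (PySem.Int.mod s (Ls*Ls*Ls)) (Ls*Ls)) Ls * Ls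
      = PySem.Int.mod (PySem.Int.mod (PySem.Int.mod s (Ls*Ls*Ls)) (Ls*Ls)) Ls := by linarith
  rw [hx]

lemma a_link_site_eq (Ls Lt : Int) (st : List Int × PySem.Dict (Int × Int) Int) (s : Int) :
    a_link_site Ls Lt st s =
      (st.1 ++ [s, s, s, s],
       (((st.2.insert (s, 0) ((st.1.length : Int))).insert (s, 1) ((st.1.length : Int) + 1)).insert
          (s, 2) ((st.1.length : Int) + 2)).insert (s, 3) ((st.1.length : Int) + 3)) := by
  simp only [a_link_site, show PySem.List.pyRange 0 4 1 = [0, 1, 2, 3] from rfl,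
    List.foldl_cons, List.foldl_nil]
  refine Prod.ext ?_ ?_ <;> simp

lemma a_first_spec (Ls Lt : Int) (m : Nat) :
    ((PySem.List.pyRange 0 (m : Int) 1).foldl (a_link_site Ls Lt)
        (([] : List Int), (PySem.Dict.empty : PySem.Dict (Int × Int) Int))).1.length = 4 * m ∧
    ∀ s d : Int, 0 ≤ s → s < (m : Int) → 0 ≤ d → d < 4 →
      ((PySem.List.pyRange 0 (m : Int) 1).foldl (a_link_site Ls Lt)
          (([] : List Int), (PySem.Dict.empty : PySem.Dict (Int × Int) Int))).2.get? (s, d) =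
        some (4 * s + d) := by
  induction m with
  | zero => simp [PySem.List.pyRange_one_eq_nil]; intro s d h1 h2; omega
  | succ k ih =>
    obtain ⟨ihlen, ihget⟩ := ih
    have hk : ((k : Int) + 1) = ((k + 1 : Nat) : Int) := by push_cast; ring
    rw [← hk, PySem.List.pyRange_one_succ_right (by positivity), List.foldl_append]
    simp only [List.foldl_cons, List.foldl_nil, a_link_site_eq]
    constructor
    · simp [ihlen]; omega
    · intro s d hs0 hsk hd0 hd4
      rw [PySem.Dict.get?_insert, PySem.Dict.get?_insert, PySem.Dict.get?_insert,
        PySem.Dict.get?_insert]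
      rw [ihlen]
      split_ifs with h3 h2 h1 h0
      · obtain ⟨hs, hd⟩ := Prod.mk.injEq .. ▸ h3; simp_all
      · obtain ⟨hs, hd⟩ := Prod.mk.injEq .. ▸ h2; simp_all
      · obtain ⟨hs, hd⟩ := Prod.mk.injEq .. ▸ h1; simp_all
      · obtain ⟨hs, hd⟩ := Prod.mk.injEq .. ▸ h0; simp_all
      · apply ihget s d hs0 ?_ hd0 hd4
        have hne : s ≠ (k : Int) := by
          intro he; subst he
          rcases show d = 0 ∨ d = 1 ∨ d = 2 ∨ d = 3 by omega with h | h | h | h <;>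
            simp [h] at h0 h1 h2 h3
        omega

lemma site_range (Ls Lt x y z t : Int) (hLs : 1 ≤ Ls) (_hLt : 1 ≤ Lt)
    (hx0 : 0 ≤ x) (hx : x < Ls) (hy0 : 0 ≤ y) (hy : y < Ls)
    (hz0 : 0 ≤ z) (hz : z < Ls) (ht0 : 0 ≤ t) (ht : t < Lt) :
    0 ≤ a_site Ls x y z t ∧ a_site Ls x y z t < Ls * Ls * Ls * Lt := by
  have h0 : (0:Int) < Ls := by omega
  constructor
  · have := mul_nonneg h0.le hy0
    have := mul_nonneg (mul_nonneg h0.le h0.le) hz0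
    have := mul_nonneg (mul_nonneg (mul_nonneg h0.le h0.le) h0.le) ht0
    simp only [a_site]; linarith
  · simp only [a_site]
    nlinarith [mul_le_mul_of_nonneg_left (show y ≤ Ls - 1 by omega) h0.le,
      mul_le_mul_of_nonneg_left (show z ≤ Ls - 1 by omega) (mul_nonneg h0.le h0.le),
      mul_le_mul_of_nonneg_left (show t ≤ Lt - 1 by omega)
        (mul_nonneg (mul_nonneg h0.le h0.le) h0.le)]

lemma a_nbr_range (Ls Lt s d : Int) (hLs : 1 ≤ Ls) (hLt : 1 ≤ Lt)
    (hs0 : 0 ≤ s) (hsn : s < Ls * Ls * Ls * Lt) (hd0 : 0 ≤ d) (hd4 : d < 4) :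
    0 ≤ a_nbr Ls Lt s d ∧ a_nbr Ls Lt s d < Ls * Ls * Ls * Lt := by
  have h0 : (0:Int) < Ls := by omega
  have h00 : (0:Int) < Ls * Ls := mul_pos h0 h0
  have h000 : (0:Int) < Ls * Ls * Ls := mul_pos h00 h0
  have hT0 : 0 ≤ PySem.Int.floordiv s (Ls*Ls*Ls) :=
    (PySem.Int.le_floordiv_iff_mul_le h000).2 (by linarith)
  have hT : PySem.Int.floordiv s (Ls*Ls*Ls) < Lt :=
    (PySem.Int.floordiv_lt_iff_lt_mul h000).2 (by rw [mul_comm]; exact hsn)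
  have hR10 : 0 ≤ PySem.Int.mod s (Ls*Ls*Ls) := PySem.Int.mod_nonneg s h000
  have hR1 : PySem.Int.mod s (Ls*Ls*Ls) < Ls*Ls*Ls := PySem.Int.mod_lt s h000
  have hZ0 : 0 ≤ PySem.Int.floordiv (PySem.Int.mod s (Ls*Ls*Ls)) (Ls*Ls) :=
    (PySem.Int.le_floordiv_iff_mul_le h00).2 (by linarith)
  have hZ : PySem.Int.floordiv (PySem.Int.mod s (Ls*Ls*Ls)) (Ls*Ls) < Ls :=
    (PySem.Int.floordiv_lt_iff_lt_mul h00).2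
      (by rw [show Ls * (Ls*Ls) = Ls*Ls*Ls by ring]; exact hR1)
  have hR20 : 0 ≤ PySem.Int.mod (PySem.Int.mod s (Ls*Ls*Ls)) (Ls*Ls) :=
    PySem.Int.mod_nonneg _ h00
  have hR2 : PySem.Int.mod (PySem.Int.mod s (Ls*Ls*Ls)) (Ls*Ls) < Ls*Ls :=
    PySem.Int.mod_lt _ h00
  have hY0 : 0 ≤ PySem.Int.floordiv (PySem.Int.mod (PySem.Int.mod s (Ls*Ls*Ls)) (Ls*Ls)) Ls :=
    (PySem.Int.le_floordiv_iff_mul_le h0).2 (by linarith)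
  have hY : PySem.Int.floordiv (PySem.Int.mod (PySem.Int.mod s (Ls*Ls*Ls)) (Ls*Ls)) Ls < Ls :=
    (PySem.Int.floordiv_lt_iff_lt_mul h0).2 hR2
  have hX0 : 0 ≤ PySem.Int.mod (PySem.Int.mod (PySem.Int.mod s (Ls*Ls*Ls)) (Ls*Ls)) Ls :=
    PySem.Int.mod_nonneg _ h0
  have hX : PySem.Int.mod (PySem.Int.mod (PySem.Int.mod s (Ls*Ls*Ls)) (Ls*Ls)) Ls < Ls :=
    PySem.Int.mod_lt _ h0
  simp only [a_nbr, coords_eq]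
  interval_cases d <;>
    · simp only [a_wrap]
      norm_num [List.set, List.getD, show (0:Int).toNat = 0 from rfl, show (1:Int).toNat = 1 from rfl, show (2:Int).toNat = 2 from rfl, show (3:Int).toNat = 3 from rfl]
      exact site_range Ls Lt _ _ _ _ hLs (by omega)
        (by first
            | exact PySem.Int.mod_nonneg _ h0
            | exact hX0) (by first
            | exact PySem.Int.mod_lt _ h0
            | exact hX)
        (by first
            | exact PySem.Int.mod_nonneg _ h0
            | exact hY0) (by first
            | exact PySem.Int.mod_lt _ h0
            | exact hY)
        (by first
            | exact PySem.Int.mod_nonneg _ h0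
            | exact hZ0) (by first
            | exact PySem.Int.mod_lt _ h0
            | exact hZ)
        (by first
            | exact PySem.Int.mod_nonneg _ (by omega)
            | exact hT0) (by first
            | exact PySem.Int.mod_lt _ (by omega)
            | exact hT)

lemma a_plaq_site_eq (Ls Lt : Int) (dict : PySem.Dict (Int × Int) Int)
    (acc : List (List (Int × Int))) (s : Int) :
    a_plaq_site Ls Lt dict acc s =
      acc ++ ([(0, 1), (0, 2), (0, 3), (1, 2), (1, 3), (2, 3)] : List (Int × Int)).map (fun p =>
        [((dict.get? (s, p.1)).getD 0, 1), ((dict.get? (a_nbr Ls Lt s p.1, p.2)).getD 0, 1),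
         ((dict.get? (a_nbr Ls Lt s p.2, p.1)).getD 0, -1), ((dict.get? (s, p.2)).getD 0, -1)]) := by
  simp only [a_plaq_site, a_nbr, show PySem.List.pyRange 0 4 1 = [0, 1, 2, 3] from rfl,
    show PySem.List.pyRange (0+1) 4 1 = [1, 2, 3] from rfl,
    show PySem.List.pyRange (1+1) 4 1 = [2, 3] from rfl,
    show PySem.List.pyRange (2+1) 4 1 = [3] from rfl,
    show PySem.List.pyRange (3+1) 4 1 = ([] : List Int) from rfl,
    List.foldl_cons, List.foldl_nil, List.map_cons, List.map_nil]
  simp [List.append_assoc]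

lemma plaq_site_emit (Ls Lt : Int) (dict : PySem.Dict (Int × Int) Int)
    (hLs : 1 ≤ Ls) (hLt : 1 ≤ Lt)
    (hdict : ∀ s d : Int, 0 ≤ s → s < Ls * Ls * Ls * Lt → 0 ≤ d → d < 4 →
      dict.get? (s, d) = some (4 * s + d))
    (acc : List (List (Int × Int))) (s : Int) (hs0 : 0 ≤ s) (hsn : s < Ls * Ls * Ls * Lt) :
    a_plaq_site Ls Lt dict acc s = acc ++ emit Ls Lt s := by
  rw [a_plaq_site_eq]
  unfold emit
  congr 1
  apply List.map_congr_left
  intro p hp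
  have h1 : 0 ≤ p.1 ∧ p.1 < 4 ∧ 0 ≤ p.2 ∧ p.2 < 4 := by fin_cases hp <;> norm_num
  obtain ⟨n10, n1n⟩ := a_nbr_range Ls Lt s p.1 hLs hLt hs0 hsn h1.1 h1.2.1
  obtain ⟨n30, n3n⟩ := a_nbr_range Ls Lt s p.2 hLs hLt hs0 hsn h1.2.2.1 h1.2.2.2
  rw [hdict s p.1 hs0 hsn h1.1 h1.2.1, hdict s p.2 hs0 hsn h1.2.2.1 h1.2.2.2,
    hdict _ p.2 n10 n1n h1.2.2.1 h1.2.2.2, hdict _ p.1 n30 n3n h1.1 h1.2.1]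
  simp

-- ---------- decoding the composed site index ----------

lemma fdmod_unique (L q r : Int) (hL : 0 < L) (h0 : 0 ≤ r) (h1 : r < L) :
    PySem.Int.floordiv (r + L*q) L = q ∧ PySem.Int.mod (r + L*q) L = r := by
  have he := PySem.Int.floordiv_mul_add_mod (r + L*q) L
  have hm0 := PySem.Int.mod_nonneg (r + L*q) hL
  have hm1 := PySem.Int.mod_lt (r + L*q) hL
  set f := PySem.Int.floordiv (r + L*q) L with hf
  set m := PySem.Int.mod (r + L*q) L with hm
  have hfq : f = q := by
    by_contra hne
    rcases lt_or_gt_of_ne hne with h | h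
    · nlinarith [mul_le_mul_of_nonneg_right (show f + 1 ≤ q by omega) hL.le]
    · nlinarith [mul_le_mul_of_nonneg_right (show q + 1 ≤ f by omega) hL.le]
  exact ⟨hfq, by rw [hfq] at he; linarith⟩

lemma coords_site (Ls x y z t : Int) (hLs : 1 ≤ Ls)
    (hx0 : 0 ≤ x) (hx : x < Ls) (hy0 : 0 ≤ y) (hy : y < Ls) (hz0 : 0 ≤ z) (hz : z < Ls) :
    a_coords Ls (a_site Ls x y z t) = [x, y, z, t] := by
  have h0 : (0:Int) < Ls := by omega
  have h00 : (0:Int) < Ls * Ls := mul_pos h0 h0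
  have h000 : (0:Int) < Ls * Ls * Ls := mul_pos h00 h0
  have hr3 : 0 ≤ x + Ls*y + Ls*Ls*z ∧ x + Ls*y + Ls*Ls*z < Ls*Ls*Ls := by
    constructor
    · nlinarith
    · nlinarith [mul_le_mul_of_nonneg_left (show y ≤ Ls - 1 by omega) h0.le,
        mul_le_mul_of_nonneg_left (show z ≤ Ls - 1 by omega) h00.le]
  have hr2 : 0 ≤ x + Ls*y ∧ x + Ls*y < Ls*Ls := by
    constructor
    · nlinarith
    · nlinarith [mul_le_mul_of_nonneg_left (show y ≤ Ls - 1 by omega) h0.le]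
  have e3 := fdmod_unique (Ls*Ls*Ls) t (x + Ls*y + Ls*Ls*z) h000 hr3.1 hr3.2
  have e2 := fdmod_unique (Ls*Ls) z (x + Ls*y) h00 hr2.1 hr2.2
  have e1 := fdmod_unique Ls y x h0 hx0 hx
  have hs : a_site Ls x y z t = (x + Ls*y + Ls*Ls*z) + (Ls*Ls*Ls)*t := by
    simp only [a_site]
  have hs2 : x + Ls*y + Ls*Ls*z = (x + Ls*y) + (Ls*Ls)*z := by ring
  rw [coords_eq, hs, e3.1, e3.2, hs2, e2.1, e2.2, e1.1, e1.2]

-- ---------- B side ----------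

-- neighbour site computed from a coordinate tuple directly (what Source B's nbr list holds)
def c_nbr (Ls Lt x y z t d : Int) : Int :=
  let w := a_wrap [Ls, Ls, Ls, Lt] [x, y, z, t] d
  w.getD 0 0 + Ls * w.getD 1 0 + Ls*Ls * w.getD 2 0 + Ls*Ls*Ls * w.getD 3 0

lemma b_nbrs_eq (Ls Lt x y z t : Int) :
    b_nbrs Ls Lt x y z t =
      [c_nbr Ls Lt x y z t 0, c_nbr Ls Lt x y z t 1,
       c_nbr Ls Lt x y z t 2, c_nbr Ls Lt x y z t 3] := by
  simp only [b_nbrs, c_nbr, a_wrap, show PySem.List.pyRange 0 4 1 = [0, 1, 2, 3] from rfl,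
    List.foldl_cons, List.foldl_nil]
  simp

lemma b_site_body_eq (Ls Lt : Int) (st : Int × List (List (Int × Int))) (x y z t : Int) :
    b_site_body Ls Lt st x y z t =
      (st.1 + 1,
       st.2 ++ ([(0, 1), (0, 2), (0, 3), (1, 2), (1, 3), (2, 3)] : List (Int × Int)).map (fun p =>
         [(4 * a_site Ls x y z t + p.1, 1), (4 * c_nbr Ls Lt x y z t p.1 + p.2, 1),
          (4 * c_nbr Ls Lt x y z t p.2 + p.1, -1), (4 * a_site Ls x y z t + p.2, -1)])) := by
  simp only [b_site_body, b_nbrs_eq, a_site,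
    show PySem.List.pyRange 0 4 1 = [0, 1, 2, 3] from rfl,
    show PySem.List.pyRange (0+1) 4 1 = [1, 2, 3] from rfl,
    show PySem.List.pyRange (1+1) 4 1 = [2, 3] from rfl,
    show PySem.List.pyRange (2+1) 4 1 = [3] from rfl,
    show PySem.List.pyRange (3+1) 4 1 = ([] : List Int) from rfl,
    List.foldl_cons, List.foldl_nil, List.map_cons, List.map_nil]
  simp [List.append_assoc]

-- the per-site step both sides reduce to
def gstep (Ls Lt : Int) (st : Int × List (List (Int × Int))) (s : Int) :
    Int × List (List (Int × Int)) :=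
  (st.1 + 1, st.2 ++ emit Ls Lt s)

lemma body_emit (Ls Lt : Int) (hLs : 1 ≤ Ls) (st : Int × List (List (Int × Int)))
    (x y z t : Int) (hx0 : 0 ≤ x) (hx : x < Ls) (hy0 : 0 ≤ y) (hy : y < Ls)
    (hz0 : 0 ≤ z) (hz : z < Ls) :
    b_site_body Ls Lt st x y z t = gstep Ls Lt st (a_site Ls x y z t) := by
  rw [b_site_body_eq]
  unfold gstep emit
  congr 2
  apply List.map_congr_left
  intro p _
  have hn : ∀ d : Int, a_nbr Ls Lt (a_site Ls x y z t) d = c_nbr Ls Lt x y z t d := by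
    intro d
    simp only [a_nbr, c_nbr]
    rw [coords_site Ls x y z t hLs hx0 hx hy0 hy hz0 hz]
    simp only [a_site]
  rw [hn, hn]

-- ---------- generic fold plumbing ----------

lemma foldl_shift {α : Type} (h : α → Int → α) (c a b : Int) (st : α) :
    (PySem.List.pyRange (c + a) (c + b) 1).foldl h st
      = (PySem.List.pyRange a b 1).foldl (fun st x => h st (c + x)) st := by
  rw [PySem.List.pyRange_one, PySem.List.pyRange_one,
    show c + b - (c + a) = b - a from by ring, List.foldl_map, List.foldl_map]
  apply PySem.List.foldl_congr_mem
  intro acc k _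
  congr 1
  ring

lemma foldl_chain {α : Type} (g : α → Int → α) (c L : Int) (hL : 0 ≤ L) (M : Nat) (st : α) :
    (PySem.List.pyRange 0 (M : Int) 1).foldl
        (fun st y => (PySem.List.pyRange (c + L*y) (c + L*y + L) 1).foldl g st) st
      = (PySem.List.pyRange c (c + L*(M : Int)) 1).foldl g st := by
  induction M with
  | zero => simp [PySem.List.pyRange_one_eq_nil]
  | succ k ih =>
    have hk : ((k : Int) + 1) = ((k + 1 : Nat) : Int) := by push_cast; ring
    rw [← hk, PySem.List.pyRange_one_succ_right (by positivity), List.foldl_append,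
      List.foldl_cons, List.foldl_nil, ih]
    have hLk : 0 ≤ L * (k : Int) := by positivity
    have hsplit : PySem.List.pyRange c (c + L*((k : Int)+1)) 1
        = PySem.List.pyRange c (c + L*(k : Int)) 1
          ++ PySem.List.pyRange (c + L*(k : Int)) (c + L*((k : Int)+1)) 1 := by
      apply PySem.List.pyRange_one_append <;> nlinarith
    rw [hsplit, List.foldl_append]
    congr 1
    have : c + L*((k : Int)+1) = c + L*(k : Int) + L := by ring
    rw [this]

lemma foldl_gstep_split (Ls Lt : Int) (l : List Int) (st : Int × List (List (Int × Int))) :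
    l.foldl (gstep Ls Lt) st
      = (st.1 + (l.length : Int), l.foldl (fun acc s => acc ++ emit Ls Lt s) st.2) := by
  induction l generalizing st with
  | nil => simp
  | cons x xs ih =>
    simp only [List.foldl_cons, ih, gstep, List.length_cons]
    refine Prod.ext ?_ rfl
    push_cast; ring_nf

-- ---------- the nested coordinate loops enumerate sites 0..n-1 in order ----------

lemma b_nested_eq (Ls Lt : Int) (hLs : 1 ≤ Ls) (hLt : 1 ≤ Lt)
    (st : Int × List (List (Int × Int))) :
    (PySem.List.pyRange 0 Lt 1).foldl (fun st t =>
      (PySem.List.pyRange 0 Ls 1).foldl (fun st z =>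
        (PySem.List.pyRange 0 Ls 1).foldl (fun st y =>
          (PySem.List.pyRange 0 Ls 1).foldl (fun st x =>
            b_site_body Ls Lt st x y z t) st) st) st) st
      = (PySem.List.pyRange 0 (Ls*Ls*Ls*Lt) 1).foldl (gstep Ls Lt) st := by
  have h0 : (0:Int) < Ls := by omega
  have hLsNat : ((Ls.toNat : Nat) : Int) = Ls := Int.toNat_of_nonneg h0.le
  have hLtNat : ((Lt.toNat : Nat) : Int) = Lt := Int.toNat_of_nonneg (by omega)
  -- x level: for fixed y z t in range, the innermost loop is a g-fold over one run of sites
  have lvlx : ∀ y z t st, 0 ≤ y → y < Ls → 0 ≤ z → z < Ls →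
      (PySem.List.pyRange 0 Ls 1).foldl (fun st x => b_site_body Ls Lt st x y z t) st
        = (PySem.List.pyRange (Ls*y + Ls*Ls*z + Ls*Ls*Ls*t)
            (Ls*y + Ls*Ls*z + Ls*Ls*Ls*t + Ls) 1).foldl (gstep Ls Lt) st := by
    intro y z t st hy0 hy hz0 hz
    have he : PySem.List.pyRange (Ls*y + Ls*Ls*z + Ls*Ls*Ls*t)
        (Ls*y + Ls*Ls*z + Ls*Ls*Ls*t + Ls) 1
        = PySem.List.pyRange ((Ls*y + Ls*Ls*z + Ls*Ls*Ls*t) + 0)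
            ((Ls*y + Ls*Ls*z + Ls*Ls*Ls*t) + Ls) 1 := by ring_nf
    rw [he, foldl_shift]
    apply PySem.List.foldl_congr_mem
    intro acc x hx
    rw [PySem.List.mem_pyRange_one] at hx
    rw [body_emit Ls Lt hLs acc x y z t hx.1 hx.2 hy0 hy hz0 hz]
    congr 1
    simp only [a_site]; ring
  -- y level
  have lvly : ∀ z t st, 0 ≤ z → z < Ls →
      (PySem.List.pyRange 0 Ls 1).foldl (fun st y =>
        (PySem.List.pyRange 0 Ls 1).foldl (fun st x => b_site_body Ls Lt st x y z t) st) st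
        = (PySem.List.pyRange (Ls*Ls*z + Ls*Ls*Ls*t)
            (Ls*Ls*z + Ls*Ls*Ls*t + Ls*Ls) 1).foldl (gstep Ls Lt) st := by
    intro z t st hz0 hz
    have step : (PySem.List.pyRange 0 Ls 1).foldl (fun st y =>
        (PySem.List.pyRange 0 Ls 1).foldl (fun st x => b_site_body Ls Lt st x y z t) st) st
        = (PySem.List.pyRange 0 Ls 1).foldl (fun st y =>
            (PySem.List.pyRange ((Ls*Ls*z + Ls*Ls*Ls*t) + Ls*y)
              ((Ls*Ls*z + Ls*Ls*Ls*t) + Ls*y + Ls) 1).foldl (gstep Ls Lt) st) st := by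
      apply PySem.List.foldl_congr_mem
      intro acc y hy
      rw [PySem.List.mem_pyRange_one] at hy
      rw [lvlx y z t acc hy.1 hy.2 hz0 hz]
      congr 2 <;> ring
    have hchain := foldl_chain (gstep Ls Lt) (Ls*Ls*z + Ls*Ls*Ls*t) Ls h0.le Ls.toNat st
    rw [hLsNat] at hchain
    rw [step, hchain,
      show Ls*Ls*z + Ls*Ls*Ls*t + Ls*Ls = Ls*Ls*z + Ls*Ls*Ls*t + Ls*Ls from rfl]
  -- z level
  have lvlz : ∀ t st,
      (PySem.List.pyRange 0 Ls 1).foldl (fun st z =>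
        (PySem.List.pyRange 0 Ls 1).foldl (fun st y =>
          (PySem.List.pyRange 0 Ls 1).foldl (fun st x => b_site_body Ls Lt st x y z t) st) st) st
        = (PySem.List.pyRange (Ls*Ls*Ls*t) (Ls*Ls*Ls*t + Ls*Ls*Ls) 1).foldl (gstep Ls Lt) st := by
    intro t st
    have step : (PySem.List.pyRange 0 Ls 1).foldl (fun st z =>
        (PySem.List.pyRange 0 Ls 1).foldl (fun st y =>
          (PySem.List.pyRange 0 Ls 1).foldl (fun st x => b_site_body Ls Lt st x y z t) st) st) st
        = (PySem.List.pyRange 0 Ls 1).foldl (fun st z =>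
            (PySem.List.pyRange ((Ls*Ls*Ls*t) + (Ls*Ls)*z)
              ((Ls*Ls*Ls*t) + (Ls*Ls)*z + Ls*Ls) 1).foldl (gstep Ls Lt) st) st := by
      apply PySem.List.foldl_congr_mem
      intro acc z hz
      rw [PySem.List.mem_pyRange_one] at hz
      rw [lvly z t acc hz.1 hz.2]
      congr 2 <;> ring
    have hchain := foldl_chain (gstep Ls Lt) (Ls*Ls*Ls*t) (Ls*Ls) (by positivity) Ls.toNat st
    rw [hLsNat] at hchain
    rw [step, hchain, show Ls*Ls*Ls*t + Ls*Ls*Ls = Ls*Ls*Ls*t + (Ls*Ls)*Ls from by ring]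
  -- t level
  have step : (PySem.List.pyRange 0 Lt 1).foldl (fun st t =>
      (PySem.List.pyRange 0 Ls 1).foldl (fun st z =>
        (PySem.List.pyRange 0 Ls 1).foldl (fun st y =>
          (PySem.List.pyRange 0 Ls 1).foldl (fun st x => b_site_body Ls Lt st x y z t) st) st) st) st
      = (PySem.List.pyRange 0 Lt 1).foldl (fun st t =>
          (PySem.List.pyRange (0 + (Ls*Ls*Ls)*t) (0 + (Ls*Ls*Ls)*t + Ls*Ls*Ls) 1).foldl
            (gstep Ls Lt) st) st := by
    apply PySem.List.foldl_congr_mem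
    intro acc t _
    rw [lvlz t acc]
    congr 2 <;> ring
  have hchain := foldl_chain (gstep Ls Lt) 0 (Ls*Ls*Ls) (by positivity) Lt.toNat st
  rw [hLtNat] at hchain
  rw [step, hchain]
  norm_num

-- ===== VERDICT (by name: the statements are the Claim_ definitions above) =====
theorem build_4d_lattice_spec : Claim_unchanged_build_4d_lattice := by
  intro Ls Lt _ hPre
  unfold Spec_build_4d_lattice
  intro hD
  unfold Pre_build_4d_lattice at hPre
  unfold D_build_4d_lattice at hD
  by_cases hpos : 1 ≤ Ls ∧ 1 ≤ Lt
  · obtain ⟨hLs, hLt⟩ := hpos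
    have h0 : (0:Int) < Ls := by omega
    have hn : (0:Int) < Ls*Ls*Ls*Lt := by positivity
    have hm : (((Ls*Ls*Ls*Lt).toNat : Nat) : Int) = Ls*Ls*Ls*Lt := Int.toNat_of_nonneg hn.le
    obtain ⟨hlen, hdict⟩ := a_first_spec Ls Lt (Ls*Ls*Ls*Lt).toNat
    rw [hm] at hlen hdict
    simp only [build_4d_lattice, build_4d_lattice_alt]
    rw [if_neg (show ¬(Ls ≤ 0 ∨ Lt ≤ 0) by omega),
      b_nested_eq Ls Lt hLs hLt, foldl_gstep_split]
    refine Prod.ext ?_ ?_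
    · simp only [hlen, PySem.List.length_pyRange_one]
      generalize Ls*Ls*Ls*Lt = n at hn ⊢
      omega
    · simp only []
      apply PySem.List.foldl_congr_mem
      intro acc s hs
      rw [PySem.List.mem_pyRange_one] at hs
      exact plaq_site_emit Ls Lt _ hLs hLt hdict acc s hs.1 hs.2
  · -- degenerate sizes: both programs build the empty lattice
    have hle : Ls*Ls*Ls*Lt ≤ 0 := by
      have hsq : (0:Int) ≤ Ls*Ls := mul_self_nonneg Ls
      rcases lt_trichotomy Ls 0 with h1 | h1 | h1
      · have hLt0 : 0 ≤ Lt := by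
          rcases hPre with h2 | h2
          · have hLs1 : Ls = -1 := by omega
            by_contra hc
            exact hD ⟨hLs1, by omega⟩
          · exact h2
        have h3 : Ls*Ls*Ls ≤ 0 := by nlinarith
        nlinarith [mul_nonneg (neg_nonneg.mpr h3) hLt0]
      · simp [h1]
      · have hLt0 : Lt ≤ 0 := by
          rcases not_and_or.mp hpos with h | h <;> omega
        have h3 : (0:Int) ≤ Ls*Ls*Ls := by positivity
        nlinarith [mul_nonneg h3 (neg_nonneg.mpr hLt0)]
    have hA : build_4d_lattice Ls Lt = (0, []) := by
      simp [build_4d_lattice, PySem.List.pyRange_one_eq_nil hle]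
    have hB : build_4d_lattice_alt Ls Lt = (0, []) := by
      have hdeg : Ls ≤ 0 ∨ Lt ≤ 0 := by
        rcases not_and_or.mp hpos with h | h <;> omega
      simp [build_4d_lattice_alt, hdeg]
    rw [hA, hB]

theorem build_4d_lattice_changed : Claim_changed_build_4d_lattice := by
  unfold Claim_changed_build_4d_lattice; decide

theorem build_4d_lattice_tight : Claim_exact_build_4d_lattice := by
  intro Ls Lt _ _ hD
  obtain ⟨hLs, hLt⟩ := hD
  subst hLs
  have hB1 : (build_4d_lattice_alt (-1) Lt).1 = 0 := by
    simp [build_4d_lattice_alt, show (-1:Int) ≤ 0 ∨ Lt ≤ 0 from Or.inl (by omega)]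
  have hc : (((-Lt).toNat : Nat) : Int) = -Lt := Int.toNat_of_nonneg (by omega)
  have hA1 : (build_4d_lattice (-1) Lt).1 = 4 * ((-Lt).toNat : Int) := by
    have hlen := (a_first_spec (-1) Lt (-Lt).toNat).1
    rw [hc] at hlen
    simp only [build_4d_lattice]
    rw [show (-1:Int)*(-1)*(-1)*Lt = -Lt from by ring, hlen]
    push_cast
    ring
  intro hEq
  have h1 := congrArg Prod.fst hEq
  rw [hA1, hB1] at h1
  omega
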